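-- pv_equiv track=rewrite | github.com/john35452/GFG_Weekly_Coding_Contest | gfg-weekly-coding-contest-118/Odd Triplets.py | countTriplet
-- ===== SOURCE A (Python) =====
-- def countTriplet(N, A, X):
--     # code here
--     first = second = 0
--     for i in range(X, N):
--         if A[i] % 2 > 0:
--             second += 1
--     ans = 0
--     for i in range(N):
--         if i - X >= 0 and A[i - X] % 2 > 0:
--             first += 1
--         if A[i] % 2 > 0:
--             ans += first * second
--         if i + X < N and A[i + X] % 2 > 0:
--             second -= 1
--     return ans
-- ===== SOURCE B (Python) =====
-- def countTriplet(N, A, X):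
--     # Prefix table of odd counts: P[k] = number of odd elements among A[0..k-1].
--     P = [0]
--     for i in range(N):
--         P.append(P[-1] + (1 if A[i] % 2 != 0 else 0))
--     total = P[-1]
--     ans = 0
--     for i in range(N):
--         if A[i] % 2 != 0:
--             left = P[max(i - X + 1, 0)]
--             right = total - P[min(i + X, N)]
--             ans += left * right
--     return ans
-- ===== Notes on version B (the rewrite author's own statement) =====
-- stated objective: alternative
-- what changed: Replaces A's two incrementally-updated sliding odd-counters (one pre-seeded scan plus per-step increment/decrement bookkeeping) by a prefix table P[k] = number of odd elements in A[0..k-1] built once, with the left and right odd counts read off by direct clamped lookups P[max(i-X+1,0)] and total-P[min(i+X,N)].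
-- outside the precondition, e.g. on countTriplet(1, [3, 5], -1): A returns 2, B raises IndexError
import Mathlib
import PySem

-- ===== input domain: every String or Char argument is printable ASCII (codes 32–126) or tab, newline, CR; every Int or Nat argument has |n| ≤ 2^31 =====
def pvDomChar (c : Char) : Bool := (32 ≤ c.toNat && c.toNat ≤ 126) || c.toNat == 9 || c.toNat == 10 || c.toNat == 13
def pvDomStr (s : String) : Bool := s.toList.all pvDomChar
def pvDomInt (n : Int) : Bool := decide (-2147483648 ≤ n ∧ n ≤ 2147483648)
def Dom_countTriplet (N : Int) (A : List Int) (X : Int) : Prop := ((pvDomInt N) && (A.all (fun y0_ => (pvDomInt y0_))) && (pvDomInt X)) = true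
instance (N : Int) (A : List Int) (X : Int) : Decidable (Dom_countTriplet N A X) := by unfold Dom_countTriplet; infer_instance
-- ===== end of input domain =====

-- B replaces A's two incrementally-updated sliding odd-counters by a prefix-count table
-- with direct clamped lookups (objective: alternative decomposition, same O(N) cost).

-- ===== PORT A =====
def countTriplet (N : Int) (A : List Int) (X : Int) : Int :=
  let second : Int := (PySem.List.pyRange X N 1).foldl
    (fun s i => if 0 < PySem.Int.mod (PySem.List.pyGetD A i 0) 2 then s + 1 else s) 0
  let r : Int × Int × Int := (PySem.List.pyRange 0 N 1).foldl
    (fun st i =>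
      let first := if 0 ≤ i - X ∧ 0 < PySem.Int.mod (PySem.List.pyGetD A (i - X) 0) 2 then st.1 + 1 else st.1
      let ans := if 0 < PySem.Int.mod (PySem.List.pyGetD A i 0) 2 then st.2.2 + first * st.2.1 else st.2.2
      let second := if i + X < N ∧ 0 < PySem.Int.mod (PySem.List.pyGetD A (i + X) 0) 2 then st.2.1 - 1 else st.2.1
      (first, second, ans))
    (0, second, 0)
  r.2.2

-- ===== PORT B =====
def countTriplet_alt (N : Int) (A : List Int) (X : Int) : Int :=
  let P : List Int := (PySem.List.pyRange 0 N 1).foldl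
    (fun P i => P ++ [PySem.List.pyGetD P (-1) 0 +
      (if PySem.Int.mod (PySem.List.pyGetD A i 0) 2 ≠ 0 then 1 else 0)]) [0]
  let total : Int := PySem.List.pyGetD P (-1) 0
  (PySem.List.pyRange 0 N 1).foldl
    (fun ans i =>
      if PySem.Int.mod (PySem.List.pyGetD A i 0) 2 ≠ 0 then
        ans + PySem.List.pyGetD P (max (i - X + 1) 0) 0 *
              (total - PySem.List.pyGetD P (min (i + X) N) 0)
      else ans) 0

-- ===== PRECONDITION & SPEC =====
-- Pre_ excludes N > len(A) (Python A raises IndexError) and X < 0, where A's value, when it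
-- returns at all, depends on Python negative-index wraparound and B raises IndexError.
def Pre_countTriplet (N : Int) (A : List Int) (X : Int) : Prop := 0 ≤ X ∧ N ≤ A.length
instance (N : Int) (A : List Int) (X : Int) : Decidable (Pre_countTriplet N A X) := by
  unfold Pre_countTriplet; infer_instance
def pvWitness_countTriplet : Int × List Int × Int := (3, ([1, 2, 3] : List Int), 1)

def Spec_countTriplet (N : Int) (A : List Int) (X : Int) (out : Int) : Prop := out = countTriplet_alt N A X
instance (N : Int) (A : List Int) (X : Int) (out : Int) : Decidable (Spec_countTriplet N A X out) := by unfold Spec_countTriplet; infer_instance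

-- ===== CLAIM (what is proved, stated in full; the proofs are below) =====
def Claim_equal_countTriplet : Prop := ∀ (N : Int) (A : List Int) (X : Int), Dom_countTriplet N A X → Pre_countTriplet N A X → Spec_countTriplet N A X (countTriplet N A X)

-- ===== LEMMAS AND PROOFS =====

-- Parity test both programs use, as a Bool (A tests `% 2 > 0`, B tests `% 2 != 0`; equal by mod_nonneg).
def pvOdd (A : List Int) (i : Int) : Bool := PySem.Int.mod (PySem.List.pyGetD A i 0) 2 ≠ 0

-- Number of odd elements at indices a ≤ i < b.
def pvS (A : List Int) (a b : Int) : Int := ((PySem.List.pyRange a b 1).countP (pvOdd A) : Int)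

lemma pvOdd_pos_iff (A : List Int) (i : Int) :
    (0 < PySem.Int.mod (PySem.List.pyGetD A i 0) 2) ↔ pvOdd A i = true := by
  have h := PySem.Int.mod_nonneg (PySem.List.pyGetD A i 0) (b := 2) (by norm_num)
  simp [pvOdd]; omega

lemma pvS_nil (A : List Int) {a b : Int} (h : b ≤ a) : pvS A a b = 0 := by
  simp [pvS, PySem.List.pyRange_one_eq_nil h]

lemma pvS_succ (A : List Int) {a b : Int} (h : a ≤ b) :
    pvS A a (b + 1) = pvS A a b + (if pvOdd A b then 1 else 0) := by
  simp [pvS, PySem.List.pyRange_one_succ_right h, List.countP_append, List.countP_cons]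

lemma pvS_cons (A : List Int) {a b : Int} (h : a < b) :
    pvS A a b = (if pvOdd A a then 1 else 0) + pvS A (a + 1) b := by
  simp [pvS, PySem.List.pyRange_one_cons h, List.countP_cons]
  split <;> omega

lemma pvS_split (A : List Int) {a c b : Int} (h1 : a ≤ c) (h2 : c ≤ b) :
    pvS A a b = pvS A a c + pvS A c b := by
  simp [pvS, PySem.List.pyRange_one_append a c b h1 h2, List.countP_append]

-- A's first loop computes pvS A X N.
lemma countFold (A : List Int) (l : List Int) (s : Int) :
    l.foldl (fun s i => if 0 < PySem.Int.mod (PySem.List.pyGetD A i 0) 2 then s + 1 else s) s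
      = s + (l.countP (pvOdd A) : Int) := by
  induction l generalizing s with
  | nil => simp
  | cons x xs ih =>
    simp only [List.foldl_cons, List.countP_cons, ih]
    by_cases h : pvOdd A x = true
    · rw [if_pos ((pvOdd_pos_iff A x).2 h)]; simp [h]; ring
    · rw [if_neg (fun hp => h ((pvOdd_pos_iff A x).1 hp))]; simp [h]

lemma first_step (A : List Int) (m X : Int) :
    (if 0 ≤ m - X ∧ 0 < PySem.Int.mod (PySem.List.pyGetD A (m - X) 0) 2
       then pvS A 0 (max (m - X) 0) + 1 else pvS A 0 (max (m - X) 0))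
    = pvS A 0 (max (m - X + 1) 0) := by
  by_cases h : 0 ≤ m - X
  · rw [max_eq_left h, max_eq_left (by omega : (0:Int) ≤ m - X + 1), pvS_succ A h]
    cases hodd : pvOdd A (m - X)
    · rw [if_neg (by rintro ⟨_, hp⟩; rw [pvOdd_pos_iff A (m - X)] at hp; simp [hodd] at hp)]
      simp
    · rw [if_pos ⟨h, (pvOdd_pos_iff A _).2 hodd⟩]
      simp
  · rw [max_eq_right (by omega : m - X ≤ 0), max_eq_right (by omega : m - X + 1 ≤ 0),
      if_neg (fun hc => h hc.1)]

lemma second_step (A : List Int) (m X N : Int) :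
    (if m + X < N ∧ 0 < PySem.Int.mod (PySem.List.pyGetD A (m + X) 0) 2
       then pvS A (min (m + X) N) N - 1 else pvS A (min (m + X) N) N)
    = pvS A (min (m + 1 + X) N) N := by
  by_cases h : m + X < N
  · rw [min_eq_left (by omega : m + X ≤ N), min_eq_left (by omega : m + 1 + X ≤ N), pvS_cons A h]
    have e : m + X + 1 = m + 1 + X := by ring
    rw [e]
    cases hodd : pvOdd A (m + X)
    · rw [if_neg (by rintro ⟨_, hp⟩; rw [pvOdd_pos_iff A (m + X)] at hp; simp [hodd] at hp)]
      simp
    · rw [if_pos ⟨h, (pvOdd_pos_iff A _).2 hodd⟩]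
      simp
  · rw [min_eq_right (by omega : N ≤ m + X), min_eq_right (by omega : N ≤ m + 1 + X),
      if_neg (fun hc => h hc.1)]

-- Invariant of A's main loop: starting at index m with first = # odd in A[0..m-X-1],
-- second = # odd in A[m+X..N-1], the final ans accumulates the product terms.
lemma A_loop (A : List Int) (N X : Int) :
    ∀ (k : Nat) (m ans : Int), 0 ≤ m → m ≤ N → (N - m).toNat = k →
    ((PySem.List.pyRange m N 1).foldl
      (fun (st : Int × Int × Int) i =>
        let first := if 0 ≤ i - X ∧ 0 < PySem.Int.mod (PySem.List.pyGetD A (i - X) 0) 2 then st.1 + 1 else st.1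
        let ans := if 0 < PySem.Int.mod (PySem.List.pyGetD A i 0) 2 then st.2.2 + first * st.2.1 else st.2.2
        let second := if i + X < N ∧ 0 < PySem.Int.mod (PySem.List.pyGetD A (i + X) 0) 2 then st.2.1 - 1 else st.2.1
        (first, second, ans))
      (pvS A 0 (max (m - X) 0), pvS A (min (m + X) N) N, ans)).2.2
    = (PySem.List.pyRange m N 1).foldl
        (fun ans i => if pvOdd A i then
            ans + pvS A 0 (max (i - X + 1) 0) * pvS A (min (i + X) N) N else ans) ans := by
  intro k
  induction k with
  | zero =>
    intro m ans h0 hm hk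
    rw [PySem.List.pyRange_one_eq_nil (by omega : N ≤ m)]
    rfl
  | succ k ih =>
    intro m ans h0 hm hk
    have hmN : m < N := by omega
    rw [PySem.List.pyRange_one_cons hmN]
    simp only [List.foldl_cons]
    rw [first_step A m X]
    rw [second_step A m X N]
    have e1 : m - X + 1 = m + 1 - X := by ring
    rw [e1]
    rw [ih (m + 1) _ (by omega) (by omega) (by omega)]
    congr 1
    by_cases hodd : pvOdd A m = true
    · rw [if_pos ((pvOdd_pos_iff A m).2 hodd), if_pos hodd]
    · rw [if_neg (fun hp => hodd ((pvOdd_pos_iff A m).1 hp)), if_neg hodd]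

-- B's first loop builds the prefix-count table.
lemma P_last (A : List Int) (n : Nat) :
    PySem.List.pyGetD ((List.range (n + 1)).map (fun k : Nat => pvS A 0 (k : Int))) (-1) 0
      = pvS A 0 (n : Int) := by
  rw [List.range_succ, List.map_append]
  exact PySem.List.pyGetD_neg_one_append_singleton _ _ _

lemma B_prefix (A : List Int) (n : Nat) :
    (PySem.List.pyRange 0 (n : Int) 1).foldl
      (fun P i => P ++ [PySem.List.pyGetD P (-1) 0 +
        (if PySem.Int.mod (PySem.List.pyGetD A i 0) 2 ≠ 0 then 1 else 0)]) [0]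
    = (List.range (n + 1)).map (fun k : Nat => pvS A 0 (k : Int)) := by
  induction n with
  | zero =>
    rw [show ((0:Nat):Int) = 0 from rfl, PySem.List.pyRange_one_eq_nil le_rfl]
    simp [pvS_nil A (le_refl (0:Int))]
  | succ n ih =>
    have hc : ((n + 1 : Nat) : Int) = (n : Int) + 1 := by push_cast; ring
    rw [hc, PySem.List.pyRange_one_succ_right (by positivity : (0:Int) ≤ (n:Int)),
      List.foldl_append, ih]
    simp only [List.foldl_cons, List.foldl_nil]
    rw [P_last A n]
    conv_rhs => rw [List.range_succ]
    rw [List.map_append]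
    congr 1
    simp only [List.map_cons, List.map_nil, List.cons.injEq, and_true]
    rw [hc, pvS_succ A (by positivity : (0:Int) ≤ (n:Int))]
    congr 1
    simp [pvOdd]

lemma P_get (A : List Int) (n : Nat) (idx : Int) (h0 : 0 ≤ idx) (h1 : idx ≤ (n : Int)) :
    PySem.List.pyGetD ((List.range (n + 1)).map (fun k : Nat => pvS A 0 (k : Int))) idx 0
      = pvS A 0 idx := by
  rw [PySem.List.pyGetD_eq_getElem _ 0 h0 (by simp; omega)]
  simp only [List.getElem_map, List.getElem_range]
  rw [Int.toNat_of_nonneg h0]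

-- ===== VERDICT (by name: the statement is the Claim_ definition above) =====
theorem countTriplet_spec : Claim_equal_countTriplet := by
  intro N A X _ hpre
  obtain ⟨hX, -⟩ := hpre
  show countTriplet N A X = countTriplet_alt N A X
  by_cases hN : N ≤ 0
  · unfold countTriplet countTriplet_alt
    rw [PySem.List.pyRange_one_eq_nil (show N ≤ X by omega),
      PySem.List.pyRange_one_eq_nil hN]
    rfl
  · have hN' : 0 ≤ N := by omega
    obtain ⟨n, hn⟩ : ∃ n : Nat, (n : Int) = N := ⟨N.toNat, Int.toNat_of_nonneg hN'⟩
    unfold countTriplet countTriplet_alt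
    dsimp only []
    rw [countFold A _ 0]
    have hinit1 : pvS A 0 (max (0 - X) 0) = 0 := by
      rw [max_eq_right (by omega : 0 - X ≤ 0)]
      exact pvS_nil A le_rfl
    have hinit2 : pvS A (min (0 + X) N) N = 0 + ((PySem.List.pyRange X N).countP (pvOdd A) : Int) := by
      rw [zero_add, zero_add]
      by_cases hXN : X ≤ N
      · rw [min_eq_left hXN]; rfl
      · rw [min_eq_right (by omega : N ≤ X)]
        rw [pvS_nil A le_rfl]
        rw [PySem.List.pyRange_one_eq_nil (by omega : N ≤ X)]
        simp
    have hA := A_loop A N X n 0 0 le_rfl hN' (by omega)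
    rw [hinit1, hinit2] at hA
    rw [hA, ← hn, B_prefix A n, P_last A n]
    apply PySem.List.foldl_congr_mem
    intro acc i hi
    rw [PySem.List.mem_pyRange_one] at hi
    have hg1 := P_get A n (max (i - X + 1) 0) (le_max_right _ _)
      (max_le (by omega) (by positivity))
    have hg2 := P_get A n (min (i + X) (n : Int)) (le_min (by omega) (by positivity))
      (min_le_right _ _)
    rw [hg1, hg2]
    have hsplit := pvS_split A (a := 0) (c := min (i + X) (n : Int)) (b := (n : Int))
      (le_min (by omega) (by positivity)) (min_le_right _ _)
    by_cases hodd : pvOdd A i = true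
    · rw [if_pos hodd, if_pos (by unfold pvOdd at hodd; exact of_decide_eq_true hodd)]
      rw [show pvS A (min (i + X) (n:Int)) (n:Int) = pvS A 0 (n:Int) - pvS A 0 (min (i + X) (n:Int)) by omega]
    · rw [if_neg hodd, if_neg (by unfold pvOdd at hodd; exact fun hc => hodd (decide_eq_true hc))]
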